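-- pv_equiv track=rewrite | github.com/piotrgorajski/shopping-analyzer | shopping_analyzer/receipt_processor/zero_eight_fixer.py | prepare_new_equations_for_each_combination
-- ===== SOURCE A (Python) =====
-- def prepare_new_equations_for_each_combination(combinations, equation):
--     alternative_equations = []
--     for combination in combinations:
--         counter = 0
--         alternative_equation = equation
--         for i in range(0, len(equation)):
--             if equation[i] == '8':
--                 alternative_equation = alternative_equation[:i] + combination[counter] + alternative_equation[i + 1:]
--                 counter += 1
--         alternative_equations.append(alternative_equation)
--     return alternative_equations
-- ===== SOURCE B (Python) =====
-- def _fill_one(combination, equation):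
--     it = iter(combination)
--     chars = []
--     for ch in equation:
--         chars.append(next(it) if ch == '8' else ch)
--     return ''.join(chars)
--
--
-- def prepare_new_equations_for_each_combination(combinations, equation):
--     return [_fill_one(combination, equation) for combination in combinations]
-- ===== Notes on version B (the rewrite author's own statement) =====
-- stated objective: idiomatic
-- what changed: B makes a single pass over the equation per combination, consuming the combination through an iterator and collecting output characters into a list joined once, instead of A's index loop that re-slices and concatenates the whole string at every '8' with an explicit counter.
import Mathlib
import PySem

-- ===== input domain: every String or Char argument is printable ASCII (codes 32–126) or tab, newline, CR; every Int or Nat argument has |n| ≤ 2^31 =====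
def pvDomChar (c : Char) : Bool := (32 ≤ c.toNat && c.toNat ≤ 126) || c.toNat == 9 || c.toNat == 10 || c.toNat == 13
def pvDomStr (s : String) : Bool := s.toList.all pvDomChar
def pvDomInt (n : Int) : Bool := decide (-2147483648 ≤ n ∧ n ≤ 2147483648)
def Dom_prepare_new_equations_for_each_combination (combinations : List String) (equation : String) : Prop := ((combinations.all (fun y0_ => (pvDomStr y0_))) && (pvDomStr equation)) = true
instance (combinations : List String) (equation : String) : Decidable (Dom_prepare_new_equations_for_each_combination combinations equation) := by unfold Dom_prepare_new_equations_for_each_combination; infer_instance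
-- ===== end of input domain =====

-- B builds each result in one pass consuming the combination through an iterator (a small
-- structural recursion in the port), instead of A's index loop that re-slices the string at
-- every '8' with an explicit counter (objective: idiomatic).


-- ===== PORT A =====
-- A's inner loop over `range(0, len(equation))`: state (counter, alternative_equation);
-- `combination[counter]` may raise IndexError, modelled by Option (none = the exception).
def pvA_fix (eq comb : List Char) : Option (Int × List Char) :=
  (PySem.List.pyRange 0 (eq.length : Int) 1).foldl
    (fun st i => st.bind (fun s =>
      if PySem.List.pyGetD eq i ' ' = '8' then
        (PySem.List.pyGet? comb s.1).bind (fun c =>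
          some (s.1 + 1,
            PySem.List.slice s.2 none (some i) ++ [c] ++ PySem.List.slice s.2 (some (i + 1)) none))
      else some s))
    (some (0, eq))

-- the exception propagates out of the whole call; outside Pre_ the port returns [] (A raises there)
def prepare_new_equations_for_each_combination (combinations : List String) (equation : String) : List String :=
  (combinations.foldl
    (fun acc combination => acc.bind (fun alternative_equations =>
      (pvA_fix equation.toList combination.toList).bind (fun st =>
        some (alternative_equations ++ [String.ofList st.2]))))
    (some [])).getD []

-- ===== PORT B =====
-- B's `for ch in equation` loop with iterator state: structural recursion on the equation's
-- chars carrying the unconsumed part of the combination; none = `next(it)` raised StopIteration.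
def pvFill : List Char → List Char → Option (List Char)
  | [], _ => some []
  | ch :: rest, comb =>
    if ch = '8' then
      match comb with
      | [] => none
      | x :: cs => (pvFill rest cs).map (fun r => x :: r)
    else (pvFill rest comb).map (fun r => ch :: r)

-- the comprehension: the exception propagates (mapM), outside Pre_ the port returns []
def prepare_new_equations_for_each_combination_alt (combinations : List String) (equation : String) : List String :=
  ((combinations.mapM (fun combination => pvFill equation.toList combination.toList)).map
    (fun rs => rs.map String.ofList)).getD []

-- ===== PRECONDITION & SPEC =====
-- Pre_ excludes exactly the inputs on which A raises IndexError: some combination has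
-- fewer characters than the equation has '8's (B raises StopIteration there too).
def Pre_prepare_new_equations_for_each_combination (combinations : List String) (equation : String) : Prop :=
  (combinations.all (fun c => equation.toList.count '8' ≤ c.toList.length)) = true
instance (combinations : List String) (equation : String) : Decidable (Pre_prepare_new_equations_for_each_combination combinations equation) := by unfold Pre_prepare_new_equations_for_each_combination; infer_instance
def pvWitness_prepare_new_equations_for_each_combination : List String × String := (["ab", "xyz"], "8+8=16")

def Spec_prepare_new_equations_for_each_combination (combinations : List String) (equation : String) (out : List String) : Prop := out = prepare_new_equations_for_each_combination_alt combinations equation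
instance (combinations : List String) (equation : String) (out : List String) : Decidable (Spec_prepare_new_equations_for_each_combination combinations equation out) := by unfold Spec_prepare_new_equations_for_each_combination; infer_instance

-- ===== CLAIM (what is proved, stated in full; the proofs are below) =====
def Claim_equal_prepare_new_equations_for_each_combination : Prop := ∀ (combinations : List String) (equation : String), Dom_prepare_new_equations_for_each_combination combinations equation → Pre_prepare_new_equations_for_each_combination combinations equation → Spec_prepare_new_equations_for_each_combination combinations equation (prepare_new_equations_for_each_combination combinations equation)

-- ===== LEMMAS AND PROOFS =====

-- canonical form of A's rewriting: replace the '8's of l from index k of comb onwards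
def pvRepl : List Char → List Char → Nat → Option (List Char)
  | [], _, _ => some []
  | c :: rest, comb, k =>
    if c = '8' then
      (comb[k]?).bind (fun x => (pvRepl rest comb (k + 1)).map (fun r => x :: r))
    else
      (pvRepl rest comb k).map (fun r => c :: r)

theorem pvfoldl_bind_none {α β : Type} (l : List α) (g : β → α → Option β) :
    l.foldl (fun st i => st.bind (fun s => g s i)) none = none := by
  induction l with
  | nil => rfl
  | cons a l ih => simpa using ih

-- A-loop invariant: processing indices [pre.length, pre.length + todo.length) of equation
-- pre ++ todo, with the prefix already rewritten to pre' (same length), counter k.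
theorem pv_lemA (todo : List Char) : ∀ (pre pre' comb : List Char) (k : Nat),
    pre'.length = pre.length →
    (PySem.List.pyRange (pre.length : Int) ((pre.length + todo.length : Nat) : Int) 1).foldl
      (fun st i => st.bind (fun s =>
        if PySem.List.pyGetD (pre ++ todo) i ' ' = '8' then
          (PySem.List.pyGet? comb s.1).bind (fun c =>
            some (s.1 + 1,
              PySem.List.slice s.2 none (some i) ++ [c] ++ PySem.List.slice s.2 (some (i + 1)) none))
        else some s))
      (some ((k : Int), pre' ++ todo))
    = (pvRepl todo comb k).map (fun r => (((k + todo.count '8' : Nat) : Int), pre' ++ r)) := by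
  induction todo with
  | nil =>
    intro pre pre' comb k h
    rw [PySem.List.pyRange_one_eq_nil (by simp)]
    simp [pvRepl]
  | cons c rest ih =>
    intro pre pre' comb k h
    rw [PySem.List.pyRange_one_cons (by push_cast [List.length_cons]; omega)]
    have hget : PySem.List.pyGetD (pre ++ c :: rest) ((pre.length : Int)) ' ' = c := by
      rw [PySem.List.pyGetD_natCast]
      simp [List.getD_eq_getElem?_getD, List.getElem?_append_right]
    have e1 : ((pre.length : Int) + 1) = (((pre ++ [c]).length : Nat) : Int) := by
      simp [List.length_append]
    have e2 : (pre.length + (c :: rest).length : Nat) = ((pre ++ [c]).length + rest.length : Nat) := by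
      simp [List.length_append]; omega
    by_cases hc : c = '8'
    · subst hc
      simp only [List.foldl_cons, Option.bind_some, hget, eq_self_iff_true, PySem.List.pyGet?_natCast]
      cases hx : comb[k]? with
      | none =>
        simp only [hx, Option.bind_none, if_true]
        rw [pvfoldl_bind_none]
        simp [pvRepl, hx]
      | some x =>
        simp only [hx, Option.bind_some, if_true]
        have hsl1 : PySem.List.slice (pre' ++ '8' :: rest) none (some ((pre.length : Int))) = pre' := by
          rw [PySem.List.slice_to_natCast]
          exact List.take_left' h
        have hsl2 : PySem.List.slice (pre' ++ '8' :: rest) (some ((pre.length : Int) + 1)) none = rest := by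
          rw [e1, PySem.List.slice_from_natCast]
          rw [show pre' ++ '8' :: rest = (pre' ++ ['8']) ++ rest by simp]
          exact List.drop_left' (by simp [h])
        rw [hsl1, hsl2]
        rw [show ((k : Int) + 1) = (((k + 1 : Nat)) : Int) by push_cast; ring]
        rw [e1, e2,
            show pre ++ '8' :: rest = (pre ++ ['8']) ++ rest by simp,
            show pre' ++ [x] ++ rest = (pre' ++ [x]) ++ rest by simp]
        rw [ih (pre ++ ['8']) (pre' ++ [x]) comb (k + 1) (by simp [h])]
        simp only [pvRepl, if_pos rfl, hx, Option.bind_some]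
        cases pvRepl rest comb (k + 1) <;>
          simp [List.count_cons, List.append_assoc] <;> push_cast <;> ring_nf
    · simp only [List.foldl_cons, Option.bind_some, hget, if_neg hc]
      rw [e1, e2,
          show pre ++ c :: rest = (pre ++ [c]) ++ rest by simp,
          show pre' ++ c :: rest = (pre' ++ [c]) ++ rest by simp]
      rw [ih (pre ++ [c]) (pre' ++ [c]) comb k (by simp [h])]
      simp only [pvRepl, if_neg hc]
      cases pvRepl rest comb k <;>
        simp [List.count_cons, hc]

theorem pv_fixA (eq comb : List Char) :
    pvA_fix eq comb = (pvRepl eq comb 0).map (fun r => (((eq.count '8' : Nat) : Int), r)) := by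
  have := pv_lemA eq [] [] comb 0 rfl
  simpa [pvA_fix] using this

-- A's indexed replacement equals B's consuming recursion: index k into comb ≙ comb.drop k
theorem pv_repl_fill (l : List Char) : ∀ (comb : List Char) (k : Nat),
    pvRepl l comb k = pvFill l (comb.drop k) := by
  induction l with
  | nil => intro comb k; simp [pvRepl, pvFill]
  | cons c rest ih =>
    intro comb k
    by_cases hc : c = '8'
    · subst hc
      simp only [pvRepl, pvFill, if_pos rfl]
      cases hd : comb.drop k with
      | nil =>
        have : comb[k]? = none := by
          have := congrArg (fun t : List Char => t[0]?) hd
          simpa [List.getElem?_drop] using this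
        simp [this]
      | cons x cs =>
        have hx : comb[k]? = some x := by
          have := congrArg (fun t : List Char => t[0]?) hd
          simpa [List.getElem?_drop] using this
        have hcs : comb.drop (k + 1) = cs := by
          have : comb.drop (k + 1) = (comb.drop k).drop 1 := by
            rw [List.drop_drop]
          rw [this, hd]; rfl
        rw [hx, ← hcs, ih comb (k + 1)]
        simp
    · simp only [pvRepl, pvFill, if_neg hc]
      rw [ih comb k]

-- the outer loops: A's Option-fold with append equals B's mapM comprehension
theorem pv_outer (eqc : List Char) (l : List String) : ∀ (init : List String),
    l.foldl
      (fun acc combination => acc.bind (fun alternative_equations =>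
        (pvA_fix eqc combination.toList).bind (fun st =>
          some (alternative_equations ++ [String.ofList st.2]))))
      (some init)
    = (l.mapM (fun combination => pvFill eqc combination.toList)).map
        (fun rs => init ++ rs.map String.ofList) := by
  induction l with
  | nil => intro init; simp
  | cons c l ih =>
    intro init
    rw [List.foldl_cons, List.mapM_cons]
    rw [pv_fixA, pv_repl_fill]
    simp only [List.drop_zero]
    cases hf : pvFill eqc c.toList with
    | none =>
      simp only [hf, Option.map_none, Option.bind_none, Option.bind_some]
      rw [pvfoldl_bind_none]
      simp
    | some r =>
      simp only [hf, Option.map_some, Option.bind_some]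
      rw [ih (init ++ [String.ofList r])]
      cases l.mapM (fun combination => pvFill eqc combination.toList) <;> simp

-- ===== VERDICT (by name: the statement is the Claim_ definition above) =====
theorem prepare_new_equations_for_each_combination_spec : Claim_equal_prepare_new_equations_for_each_combination := by
  intro combinations equation _ _
  unfold Spec_prepare_new_equations_for_each_combination
  unfold prepare_new_equations_for_each_combination prepare_new_equations_for_each_combination_alt
  rw [pv_outer]
  simp
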